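-- pv_equiv track=rewrite | github.com/mgiannopoulos24/Leetcode | Python/1943.py | splitPainting
-- ===== SOURCE A (Python) =====
-- from typing import List
--
-- from collections import defaultdict
--
-- def splitPainting(segments: List[List[int]]) -> List[List[int]]:
--     # Create a dictionary to store the color changes at each point
--     color_changes = defaultdict(int)
--
--     # Populate the color_changes dictionary
--     for start, end, color in segments:
--         color_changes[start] += color
--         color_changes[end] -= color
--
--     # Sort the event points
--     sorted_points = sorted(color_changes.keys())
--
--     # Initialize the result list
--     painting = []
--
--     # Initialize the current color sum and the previous point
--     current_sum = 0
--     prev_point = None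
--
--     # Iterate through the sorted points
--     for point in sorted_points:
--         if prev_point is not None and current_sum != 0:
--             painting.append([prev_point, point, current_sum])
--         current_sum += color_changes[point]
--         prev_point = point
--
--     return painting
-- ===== SOURCE B (Python) =====
-- from typing import List
--
-- def splitPainting(segments: List[List[int]]) -> List[List[int]]:
--     # Gap-by-gap direct coverage query: no event deltas, no running sum.
--     points = sorted({x for s, e, c in segments for x in (s, e)})
--     painting = []
--     for p, q in zip(points, points[1:]):
--         total = sum(c * ((s <= p) - (e <= p)) for s, e, c in segments)
--         if total:
--             painting.append([p, q, total])
--     return painting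
-- ===== Notes on version B (the rewrite author's own statement) =====
-- stated objective: simpler
-- what changed: Replaces the event-delta dict and the running prefix sum over sorted event points by a direct per-gap coverage query: for each pair of adjacent distinct coordinates it recomputes from scratch the summed color of all segments covering that gap, so no delta accumulator or dict exists at all.
import Mathlib
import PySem

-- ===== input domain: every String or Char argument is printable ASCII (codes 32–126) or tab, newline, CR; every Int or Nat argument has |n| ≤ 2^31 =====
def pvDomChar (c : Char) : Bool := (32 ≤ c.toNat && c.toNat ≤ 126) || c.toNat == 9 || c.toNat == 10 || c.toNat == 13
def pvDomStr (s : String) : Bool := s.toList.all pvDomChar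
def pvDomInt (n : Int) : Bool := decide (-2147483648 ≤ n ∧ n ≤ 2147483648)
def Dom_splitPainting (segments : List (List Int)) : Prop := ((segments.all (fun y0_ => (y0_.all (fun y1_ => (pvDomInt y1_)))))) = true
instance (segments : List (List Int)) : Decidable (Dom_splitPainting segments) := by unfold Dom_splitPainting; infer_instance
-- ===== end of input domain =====

-- B replaces A's event-delta dict and running prefix sum by a direct per-gap coverage query
-- (for each adjacent pair of distinct coordinates, the summed color of the segments covering the
-- gap is recomputed from scratch); equivalence is proved on segments of length 3 (Python tuple
-- unpacking raises ValueError otherwise).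

-- ===== PORT A =====
-- 'for start, end, color in segments' unpacks; a segment not of length 3 raises ValueError
-- (excluded by Pre_); the total port skips such a segment.
def splitPainting (segments : List (List Int)) : List (List Int) :=
  let colorChanges : PySem.Dict Int Int :=
    segments.foldl (fun d seg =>
      match seg with
      | [s, e, c] => (d.modify s 0 (· + c)).modify e 0 (· - c)
      | _ => d) PySem.Dict.empty
  let sortedPoints := PySem.List.sorted colorChanges.keys (fun x => x) false
  (sortedPoints.foldl (fun (st : List (List Int) × Int × Option Int) point =>
      (match st.2.2 with
       | some prevPoint => if st.2.1 ≠ 0 then st.1 ++ [[prevPoint, point, st.2.1]] else st.1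
       | none => st.1,
       st.2.1 + colorChanges.getD point 0, some point)) ([], 0, none)).1

-- ===== PORT B =====
-- the coordinate set comprehension of Source B (unpacking raises on a segment not of length 3,
-- excluded by Pre_; the total port skips such a segment)
def pvCoords (seg : List Int) : List Int :=
  if seg.length = 3 then [seg.getD 0 0, seg.getD 1 0] else []

-- the inner 'sum(c * ((s <= p) - (e <= p)) for s, e, c in segments)' of Source B
def pvCov (segments : List (List Int)) (p : Int) : Int :=
  (segments.map (fun seg =>
    if seg.length = 3 then
      seg.getD 2 0 *
        ((if seg.getD 0 0 ≤ p then (1 : Int) else 0) - (if seg.getD 1 0 ≤ p then (1 : Int) else 0))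
    else 0)).sum

def splitPainting_alt (segments : List (List Int)) : List (List Int) :=
  let points := PySem.List.sorted (PySem.Set.ofList (segments.flatMap pvCoords)) (fun x => x) false
  (points.zip points.tail).foldl
    (fun res pq =>
      let total := pvCov segments pq.1
      if total ≠ 0 then res ++ [[pq.1, pq.2, total]] else res) []

-- ===== PRECONDITION & SPEC =====
-- Pre_ excludes segments not of length 3, on which A's (and B's) tuple unpacking raises ValueError.
def Pre_splitPainting (segments : List (List Int)) : Prop :=
  ∀ seg ∈ segments, seg.length = 3
instance (segments : List (List Int)) : Decidable (Pre_splitPainting segments) := by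
  unfold Pre_splitPainting; infer_instance

def pvWitness_splitPainting : List (List Int) := [[1, 4, 5], [4, 7, 7], [1, 7, 9]]

def Spec_splitPainting (segments : List (List Int)) (out : List (List Int)) : Prop :=
  out = splitPainting_alt segments
instance (segments : List (List Int)) (out : List (List Int)) : Decidable (Spec_splitPainting segments out) := by
  unfold Spec_splitPainting; infer_instance

-- ===== CLAIM (what is proved, stated in full; the proofs are below) =====
def Claim_equal_splitPainting : Prop := ∀ (segments : List (List Int)), Dom_splitPainting segments → Pre_splitPainting segments → Spec_splitPainting segments (splitPainting segments)

-- ===== LEMMAS AND PROOFS =====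

-- one event (coordinate, delta) per dict update of A, per segment
def pvToEvents (seg : List Int) : List (Int × Int) :=
  match seg with
  | [s, e, c] => [(s, c), (e, -c)]
  | _ => []

-- total delta contributed at coordinate p by an event list
def pvDelta (events : List (Int × Int)) (p : Int) : Int :=
  ((events.filter (fun q => q.1 == p)).map Prod.snd).sum

-- one step of A's emission loop, abstracted over the delta function
def pvEmitF (δ : Int → Int) (st : List (List Int) × Int × Option Int) (point : Int) :
    List (List Int) × Int × Option Int :=
  (match st.2.2 with
   | some prevPoint => if st.2.1 ≠ 0 then st.1 ++ [[prevPoint, point, st.2.1]] else st.1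
   | none => st.1,
   st.2.1 + δ point, some point)

-- one step of B's emission loop
def pvGapF (segments : List (List Int)) (res : List (List Int)) (pq : Int × Int) :
    List (List Int) :=
  let total := pvCov segments pq.1
  if total ≠ 0 then res ++ [[pq.1, pq.2, total]] else res

theorem pvDelta_append (a b : List (Int × Int)) (p : Int) :
    pvDelta (a ++ b) p = pvDelta a p + pvDelta b p := by
  simp [pvDelta]

-- the delta dict A builds, as a named value
def pvDict (segments : List (List Int)) : PySem.Dict Int Int :=
  segments.foldl (fun d seg =>
    match seg with
    | [s, e, c] => (d.modify s 0 (· + c)).modify e 0 (· - c)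
    | _ => d) PySem.Dict.empty

theorem pvDict_getD (events : List (Int × Int)) (d : PySem.Dict Int Int) (p : Int) :
    (events.foldl (fun d q => d.modify q.1 0 (· + q.2)) d).getD p 0
      = d.getD p 0 + pvDelta events p := by
  induction events generalizing d with
  | nil => simp [pvDelta]
  | cons q rest ih =>
    simp only [List.foldl_cons]
    rw [ih]
    by_cases hq : q.1 = p
    · rw [PySem.Dict.getD_modify]
      simp [pvDelta, hq]; ring
    · rw [PySem.Dict.getD_modify]
      simp [pvDelta, hq, Ne.symm hq]

theorem pvDict_events (segments : List (List Int)) :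
    pvDict segments
      = (segments.flatMap pvToEvents).foldl (fun d q => d.modify q.1 0 (· + q.2)) PySem.Dict.empty := by
  rw [List.foldl_flatMap]
  apply PySem.List.foldl_congr_mem
  intro d seg _
  rcases seg with _ | ⟨s, _ | ⟨e, _ | ⟨c, _ | _⟩⟩⟩ <;> simp [pvToEvents, sub_eq_add_neg]

theorem pvDict_getD_eq (segments : List (List Int)) (q : Int) :
    (pvDict segments).getD q 0 = pvDelta (segments.flatMap pvToEvents) q := by
  rw [pvDict_events, pvDict_getD]; simp

theorem pvCoords_eq (seg : List Int) : pvCoords seg = (pvToEvents seg).map Prod.fst := by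
  rcases seg with _ | ⟨s, _ | ⟨e, _ | ⟨c, _ | _⟩⟩⟩ <;> simp [pvCoords, pvToEvents]

theorem pvDict_keys (segments : List (List Int)) :
    (pvDict segments).keys = PySem.Set.ofList (segments.flatMap pvCoords) := by
  rw [pvDict_events]
  rw [PySem.Dict.keys_foldl_modify_key (segments.flatMap pvToEvents) Prod.fst 0
    (fun _ q => (· + q.2)) PySem.Dict.empty]
  rw [PySem.Dict.keys_empty]
  have : segments.flatMap pvCoords = (segments.flatMap pvToEvents).map Prod.fst := by
    rw [List.map_flatMap]
    exact List.flatMap_congr (fun seg _ => pvCoords_eq seg)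
  rw [this]
  rfl

-- the signed coverage increment of one segment between two query points with no coordinate between
theorem pvCov_gap (segments : List (List Int)) (prev q : Int) (hlt : prev < q)
    (h : ∀ x ∈ segments.flatMap pvCoords, x ≤ prev ∨ q ≤ x) :
    pvCov segments q = pvCov segments prev + pvDelta (segments.flatMap pvToEvents) q := by
  induction segments with
  | nil => simp [pvCov, pvDelta]
  | cons seg rest ih =>
    have hrest : ∀ x ∈ rest.flatMap pvCoords, x ≤ prev ∨ q ≤ x := by
      intro x hx; exact h x (by simp [hx])
    have ihr := ih hrest
    rcases seg with _ | ⟨s, _ | ⟨e, _ | ⟨c, _ | ⟨d, tl⟩⟩⟩⟩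
    · simpa [pvCov, pvToEvents, pvDelta_append, pvDelta] using ihr
    · simpa [pvCov, pvToEvents, pvDelta_append, pvDelta] using ihr
    · simpa [pvCov, pvToEvents, pvDelta_append, pvDelta] using ihr
    · have hs : s ≤ prev ∨ q ≤ s := h s (by simp [pvCoords])
      have he : e ≤ prev ∨ q ≤ e := h e (by simp [pvCoords])
      have hd : pvDelta (pvToEvents [s, e, c]) q
          = (if s = q then c else 0) - (if e = q then c else 0) := by
        simp only [pvToEvents, pvDelta]
        by_cases h1 : s = q <;> by_cases h2 : e = q <;> simp [h1, h2]
      have hcq : ∀ p, pvCov ([s, e, c] :: rest) p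
          = c * ((if s ≤ p then (1 : Int) else 0) - (if e ≤ p then (1 : Int) else 0))
            + pvCov rest p := by
        intro p; simp [pvCov]
      simp only [List.flatMap_cons, pvDelta_append, hd, hcq]
      rw [ihr]
      split_ifs <;> ring_nf <;> omega
    · simpa [pvCov, pvToEvents, pvDelta_append, pvDelta] using ihr

-- below any lower bound of all coordinates, nothing is covered
theorem pvCov_low (segments : List (List Int)) (p : Int)
    (h : ∀ x ∈ segments.flatMap pvCoords, p < x) :
    pvCov segments p = 0 := by
  induction segments with
  | nil => simp [pvCov]
  | cons seg rest ih =>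
    have hrest : pvCov rest p = 0 := ih (fun x hx => h x (by simp [hx]))
    rcases seg with _ | ⟨s, _ | ⟨e, _ | ⟨c, _ | ⟨d, tl⟩⟩⟩⟩
    · simpa [pvCov] using hrest
    · simpa [pvCov] using hrest
    · simpa [pvCov] using hrest
    · have hs : p < s := h s (by simp [pvCoords])
      have he : p < e := h e (by simp [pvCoords])
      have : pvCov ([s, e, c] :: rest) p
          = c * ((if s ≤ p then (1 : Int) else 0) - (if e ≤ p then (1 : Int) else 0))
            + pvCov rest p := by simp [pvCov]
      rw [this, if_neg (by omega), if_neg (by omega), hrest]; ring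
    · simpa [pvCov] using hrest

-- at a lower bound of all coordinates, coverage equals the raw delta
theorem pvCov_first (segments : List (List Int)) (q : Int)
    (h : ∀ x ∈ segments.flatMap pvCoords, q ≤ x) :
    pvCov segments q = pvDelta (segments.flatMap pvToEvents) q := by
  have hgap := pvCov_gap segments (q - 1) q (by omega)
    (by intro x hx; exact Or.inr (h x hx))
  have hz : pvCov segments (q - 1) = 0 :=
    pvCov_low segments (q - 1) (by intro x hx; have := h x hx; omega)
  omega

-- the main loop correspondence: A's running-sum fold over the remaining points equals
-- B's per-gap fold over the adjacent pairs, given cur = coverage at prev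
theorem pvLoop_eq (segments : List (List Int)) :
    ∀ (rest : List Int) (prev : Int) (res : List (List Int)),
    (prev :: rest).Pairwise (· < ·) →
    (∀ x ∈ segments.flatMap pvCoords, x ≤ prev ∨ x ∈ rest) →
    (rest.foldl (pvEmitF (pvDelta (segments.flatMap pvToEvents)))
        (res, pvCov segments prev, some prev)).1
      = ((prev :: rest).zip rest).foldl (pvGapF segments) res := by
  intro rest
  induction rest with
  | nil => intro prev res _ _; simp
  | cons q rest' ih =>
    intro prev res hpw hmem
    obtain ⟨hplt, hpw'⟩ := List.pairwise_cons.mp hpw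
    have hltq : prev < q := hplt q (by simp)
    have hgapmem : ∀ x ∈ segments.flatMap pvCoords, x ≤ prev ∨ q ≤ x := by
      intro x hx
      rcases hmem x hx with h1 | h1
      · exact Or.inl h1
      · rcases List.mem_cons.mp h1 with h2 | h2
        · omega
        · exact Or.inr (le_of_lt ((List.pairwise_cons.mp hpw').1 x h2))
    have hcur : pvCov segments prev + pvDelta (segments.flatMap pvToEvents) q
        = pvCov segments q := (pvCov_gap segments prev q hltq hgapmem).symm
    have hmem' : ∀ x ∈ segments.flatMap pvCoords, x ≤ q ∨ x ∈ rest' := by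
      intro x hx
      rcases hmem x hx with h1 | h1
      · exact Or.inl (by omega)
      · rcases List.mem_cons.mp h1 with h2 | h2
        · exact Or.inl (by omega)
        · exact Or.inr h2
    have hstep : (List.foldl (pvEmitF (pvDelta (segments.flatMap pvToEvents)))
          (res, pvCov segments prev, some prev) (q :: rest')).1
        = (List.foldl (pvEmitF (pvDelta (segments.flatMap pvToEvents)))
          (pvGapF segments res (prev, q), pvCov segments q, some q) rest').1 := by
      simp only [List.foldl_cons, pvEmitF, pvGapF, hcur]
    rw [hstep, ih q (pvGapF segments res (prev, q)) hpw' hmem']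
    simp [List.zip]

theorem pvPorts_eq (segments : List (List Int)) :
    splitPainting segments = splitPainting_alt segments := by
  have hkeys : PySem.List.sorted (pvDict segments).keys (fun x => x) false
      = PySem.List.sorted (PySem.Set.ofList (segments.flatMap pvCoords)) (fun x => x) false := by
    rw [pvDict_keys]
  have hA : splitPainting segments
      = ((PySem.List.sorted (pvDict segments).keys (fun x => x) false).foldl
          (pvEmitF (fun q => (pvDict segments).getD q 0)) ([], 0, none)).1 := rfl
  set pts := PySem.List.sorted (PySem.Set.ofList (segments.flatMap pvCoords)) (fun x => x) false
    with hpts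
  have hB : splitPainting_alt segments = (pts.zip pts.tail).foldl (pvGapF segments) [] := rfl
  rw [hA, hB, hkeys]
  have hδ : (fun q => (pvDict segments).getD q 0)
      = pvDelta (segments.flatMap pvToEvents) := funext (pvDict_getD_eq segments)
  rw [hδ]
  have hlt : pts.Pairwise (· < ·) := by
    have hle := PySem.List.sorted_pairwise (PySem.Set.ofList (segments.flatMap pvCoords))
      (fun x => x)
    have hnd : pts.Nodup :=
      ((PySem.List.sorted_perm _ _ _).nodup_iff).mpr
        (PySem.Set.nodup_ofList (segments.flatMap pvCoords))
    exact (hle.and hnd).imp (fun h => lt_of_le_of_ne h.1 h.2)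
  have hmemall : ∀ x ∈ segments.flatMap pvCoords, x ∈ pts := by
    intro x hx
    rw [hpts, (PySem.List.sorted_perm _ _ _).mem_iff, PySem.Set.mem_ofList]
    exact hx
  rcases hcase : pts with _ | ⟨p0, rest⟩
  · simp
  · have hfirst : ∀ x ∈ segments.flatMap pvCoords, p0 ≤ x := by
      intro x hx
      have := hmemall x hx
      rw [hcase] at this hlt
      rcases List.mem_cons.mp this with h1 | h1
      · omega
      · exact le_of_lt ((List.pairwise_cons.mp hlt).1 x h1)
    have hmemrest : ∀ x ∈ segments.flatMap pvCoords, x ≤ p0 ∨ x ∈ rest := by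
      intro x hx
      have := hmemall x hx
      rw [hcase] at this
      rcases List.mem_cons.mp this with h1 | h1
      · exact Or.inl (by omega)
      · exact Or.inr h1
    rw [hcase] at hlt
    have h0 : List.foldl (pvEmitF (pvDelta (segments.flatMap pvToEvents)))
          ([], 0, none) (p0 :: rest)
        = List.foldl (pvEmitF (pvDelta (segments.flatMap pvToEvents)))
          ([], pvCov segments p0, some p0) rest := by
      simp only [List.foldl_cons, pvEmitF, pvCov_first segments p0 hfirst, zero_add]
    rw [h0, pvLoop_eq segments rest p0 [] hlt hmemrest]
    simp [List.zip]

-- ===== VERDICT (by name: the statement is the Claim_ definition above) =====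
theorem splitPainting_spec : Claim_equal_splitPainting := by
  intro segments _ _
  unfold Spec_splitPainting
  exact pvPorts_eq segments
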